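-- pv_equiv track=rewrite | github.com/abdel-habib/mmg-clip | mmgclip/utils/data_utils.py | process_class_list
-- ===== SOURCE A (Python) =====
-- def process_class_list(class_list:list):
--     '''
--     Pre-processing function mainly useful to match the training labels with the inference labels.
--     This is in the case that there is a mis-match between the labels trained with those in the enums
--     file.
--
--     Args:
--         class_list (list): a list of labels / classes that will be fed to the text encoder.
--
--     Returns:
--         class_list (list): the same list passed, but processed.
--     '''
--     if not isinstance(class_list, list):
--         raise ValueError("`class_list` has to be a list of classes.")
--
--     # # remove undefined mainly in sentence training
--     # if 'undefined' in class_list: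
--     #     class_list = [item for item in class_list if item != 'undefined']
--
--     # For mass margins
--     class_list = ['ill defined' if x == 'illdefined' else x for x in class_list] if 'illdefined' in class_list else class_list
--
--     # for mass
--     class_list = ['no mass' if x == 'nomass' else x for x in class_list] if 'nomass' in class_list else class_list
--
--     # for calc
--     class_list = ['non-calcified' if x == 'noncalcified' else x for x in class_list] if 'noncalcified' in class_list else class_list
--     class_list = ['has calcification' if x == 'hascalcification' else x for x in class_list] if 'hascalcification' in class_list else class_list
--
--
--     class_list = ['no architectural distortion' if x == 'noarchitecturaldistortion' else x for x in class_list] if 'noarchitecturaldistortion' in class_list else class_list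
--     class_list = ['displayed architectural distortion' if x == 'displayedarchitecturaldistortion' else x for x in class_list] if 'displayedarchitecturaldistortion' in class_list else class_list
--
--     # For mass shape
--     # lobular is merged in the image-label training to the oval
--     # if 'lobular' in class_list:
--     #     class_list = [item for item in class_list if item != 'lobular']
--
--     # Make them all as capital letters
--     # class_list = [l.capitalize() for l in class_list]
--
--     return class_list
-- ===== SOURCE B (Python) =====
-- _MAP = {
--     'illdefined': 'ill defined',
--     'nomass': 'no mass',
--     'noncalcified': 'non-calcified',
--     'hascalcification': 'has calcification',
--     'noarchitecturaldistortion': 'no architectural distortion',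
--     'displayedarchitecturaldistortion': 'displayed architectural distortion',
-- }
--
-- def process_class_list(class_list:list):
--     if not isinstance(class_list, list):
--         raise ValueError("`class_list` has to be a list of classes.")
--     return [_MAP.get(x, x) for x in class_list]
-- ===== Notes on version B (the rewrite author's own statement) =====
-- stated objective: simpler
-- what changed: Replaces six separate membership-guarded full-list rewrite passes with one dict lookup table and a single comprehension over the list.
import Mathlib
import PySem

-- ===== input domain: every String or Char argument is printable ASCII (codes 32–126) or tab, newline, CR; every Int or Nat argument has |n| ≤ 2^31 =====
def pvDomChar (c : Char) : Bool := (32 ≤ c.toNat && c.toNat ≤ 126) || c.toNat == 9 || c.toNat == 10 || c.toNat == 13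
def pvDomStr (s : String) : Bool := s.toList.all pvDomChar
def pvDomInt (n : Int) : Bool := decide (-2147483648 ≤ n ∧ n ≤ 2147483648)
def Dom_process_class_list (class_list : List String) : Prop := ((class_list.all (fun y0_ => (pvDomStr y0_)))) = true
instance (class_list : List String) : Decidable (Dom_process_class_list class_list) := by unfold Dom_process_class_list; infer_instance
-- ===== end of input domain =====

-- B replaces A's six membership-guarded full-list rewrite passes with one lookup table and a single pass (objective: simpler).

-- ===== PORT A =====
-- one conditional rewrite pass: ['rep' if x == key else x for x in l] if key in l else l
def pvPass (key rep : String) (l : List String) : List String :=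
  if l.contains key then l.map (fun x => if x == key then rep else x) else l

def process_class_list (class_list : List String) : List String :=
  pvPass "displayedarchitecturaldistortion" "displayed architectural distortion"
   (pvPass "noarchitecturaldistortion" "no architectural distortion"
    (pvPass "hascalcification" "has calcification"
     (pvPass "noncalcified" "non-calcified"
      (pvPass "nomass" "no mass"
       (pvPass "illdefined" "ill defined" class_list)))))

-- ===== PORT B =====
def pvMapping : PySem.Dict String String := PySem.Dict.ofList
  [("illdefined", "ill defined"),
   ("nomass", "no mass"),
   ("noncalcified", "non-calcified"),
   ("hascalcification", "has calcification"),
   ("noarchitecturaldistortion", "no architectural distortion"),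
   ("displayedarchitecturaldistortion", "displayed architectural distortion")]

def process_class_list_alt (class_list : List String) : List String :=
  class_list.map (fun x => pvMapping.getD x x)

-- ===== PRECONDITION & SPEC =====
def Spec_process_class_list (class_list : List String) (out : List String) : Prop := out = process_class_list_alt class_list
instance (class_list : List String) (out : List String) : Decidable (Spec_process_class_list class_list out) := by unfold Spec_process_class_list; infer_instance

-- ===== CLAIM (what is proved, stated in full; the proofs are below) =====
def Claim_equal_process_class_list : Prop := ∀ (class_list : List String), Dom_process_class_list class_list → Spec_process_class_list class_list (process_class_list class_list)

-- ===== LEMMAS AND PROOFS =====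

-- the membership guard is irrelevant: when the key is absent the map is the identity
theorem pvPass_eq_map (key rep : String) (l : List String) :
    pvPass key rep l = l.map (fun x => if x == key then rep else x) := by
  unfold pvPass
  split
  · rfl
  · next h =>
    have hc : ∀ x ∈ l, (if x == key then rep else x) = id x := by
      intro x hx
      have : x ≠ key := by
        intro e; subst e; exact h (List.contains_iff_mem.mpr hx)
      simp [this]
    rw [List.map_congr_left hc, List.map_id]

-- pointwise: the six rewrites composed equal one table lookup
theorem pvStep_eq_lookup (x : String) :
    (fun y => if y == "displayedarchitecturaldistortion" then "displayed architectural distortion" else y)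
    ((fun y => if y == "noarchitecturaldistortion" then "no architectural distortion" else y)
     ((fun y => if y == "hascalcification" then "has calcification" else y)
      ((fun y => if y == "noncalcified" then "non-calcified" else y)
       ((fun y => if y == "nomass" then "no mass" else y)
        ((fun y => if y == "illdefined" then "ill defined" else y) x)))))
    = pvMapping.getD x x := by
  by_cases h1 : x = "illdefined"
  · subst h1; decide
  by_cases h2 : x = "nomass"
  · subst h2; decide
  by_cases h3 : x = "noncalcified"
  · subst h3; decide
  by_cases h4 : x = "hascalcification"
  · subst h4; decide
  by_cases h5 : x = "noarchitecturaldistortion"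
  · subst h5; decide
  by_cases h6 : x = "displayedarchitecturaldistortion"
  · subst h6; decide
  · have hmk : pvMapping = PySem.Dict.mk
        [("illdefined", "ill defined"),
         ("nomass", "no mass"),
         ("noncalcified", "non-calcified"),
         ("hascalcification", "has calcification"),
         ("noarchitecturaldistortion", "no architectural distortion"),
         ("displayedarchitecturaldistortion", "displayed architectural distortion")] := by decide
    rw [hmk]
    have n1 : "illdefined" ≠ x := Ne.symm h1
    have n2 : "nomass" ≠ x := Ne.symm h2
    have n3 : "noncalcified" ≠ x := Ne.symm h3
    have n4 : "hascalcification" ≠ x := Ne.symm h4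
    have n5 : "noarchitecturaldistortion" ≠ x := Ne.symm h5
    have n6 : "displayedarchitecturaldistortion" ≠ x := Ne.symm h6
    simp [PySem.Dict.getD, PySem.Dict.get?,
      h1, h2, h3, h4, h5, h6, n1, n2, n3, n4, n5, n6]

-- ===== VERDICT (by name: the statement is the Claim_ definition above) =====
theorem process_class_list_spec : Claim_equal_process_class_list := by
  intro class_list _
  unfold Spec_process_class_list process_class_list process_class_list_alt
  simp only [pvPass_eq_map, List.map_map]
  apply List.map_congr_left
  intro x _
  exact pvStep_eq_lookup x
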